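-- pv_equiv track=rewrite | github.com/jramaswami/Binary_Search_Python | overchoice.py | solve
-- ===== SOURCE A (Python) =====
-- def solve(s):
--     i = 0
--     soln = [[]]
--     while i < len(s):
--         if s[i] == "[":
--             # Find the end of the bracket
--             j = i
--             while s[j] != "]":
--                 j += 1
--             tokens = s[i+1:j].split("|")
--             soln0 = []
--             for t in tokens:
--                 for x in soln:
--                     x0 = list(x)
--                     x0.append(t)
--                     soln0.append(x0)
--             soln = soln0
--             i = j + 1
--         else:
--             j = i
--             # Find the first bracket
--             while j < len(s) and s[j] != "[":
--                 j += 1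
--
--             for x in soln:
--                 x.append(s[i:j])
--             i = j
--
--     return ["".join(t) for t in soln]
-- ===== SOURCE B (Python) =====
-- def solve(s):
--     # One char-level pass builds the list of choice-segments, then the result
--     # is assembled by a right-to-left product fold (leftmost segment cycles fastest).
--     segs = []
--     buf = []
--     inside = False
--     for ch in s:
--         if inside:
--             if ch == ']':
--                 segs.append(''.join(buf).split('|'))
--                 buf = []
--                 inside = False
--             else:
--                 buf.append(ch)
--         elif ch == '[':
--             if buf:
--                 segs.append([''.join(buf)])
--                 buf = []
--             inside = True
--         else:
--             buf.append(ch)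
--     if inside:
--         raise ValueError("unterminated bracket")
--     if buf:
--         segs.append([''.join(buf)])
--     out = ['']
--     for choices in reversed(segs):
--         out = [c + suffix for suffix in out for c in choices]
--     return out
-- ===== Notes on version B (the rewrite author's own statement) =====
-- stated objective: alternative
-- what changed: B replaces A's index-arithmetic scanning interleaved with incremental list-of-lists expansion by one char-level pass that parses the string into a list of segment choice-lists, followed by a right-to-left product fold that concatenates strings directly (leftmost segment cycling fastest, matching A's order).
import Mathlib
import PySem

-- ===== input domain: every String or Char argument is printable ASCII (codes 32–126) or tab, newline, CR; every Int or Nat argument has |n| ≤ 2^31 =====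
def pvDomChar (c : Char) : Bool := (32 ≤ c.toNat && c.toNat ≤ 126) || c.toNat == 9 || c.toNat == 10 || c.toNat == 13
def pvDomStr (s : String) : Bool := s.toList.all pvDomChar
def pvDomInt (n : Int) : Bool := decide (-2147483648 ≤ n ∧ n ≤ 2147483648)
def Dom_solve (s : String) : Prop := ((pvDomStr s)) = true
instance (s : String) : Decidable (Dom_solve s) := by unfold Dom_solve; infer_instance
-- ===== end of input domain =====

-- B parses the string in one char-level pass into segment choice-lists and then builds the
-- result by a right-to-left product fold over them, instead of A's index scans interleaved
-- with incremental list-of-lists expansion (objective: alternative decomposition).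

-- ===== PORT A =====
-- inner while loop `j = i; while s[j] != "]": j += 1` (none = IndexError past the end)
def findClose (cs : List Char) (j : Nat) : Option Nat :=
  if h : j < cs.length then
    if cs[j] = ']' then some j else findClose cs (j + 1)
  else none
termination_by cs.length - j

-- cited by loopA's decreasing_by
theorem findClose_ge (cs : List Char) (j k : Nat) (h : findClose cs j = some k) : j ≤ k := by
  rw [findClose] at h
  split at h
  · split at h
    · injection h with h'; omega
    · have := findClose_ge cs (j + 1) k h; omega
  · cases h
termination_by cs.length - j

-- inner while loop `j = i; while j < len(s) and s[j] != "[": j += 1`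
def findOpen (cs : List Char) (j : Nat) : Nat :=
  if h : j < cs.length then
    if cs[j] = '[' then j else findOpen cs (j + 1)
  else j
termination_by cs.length - j

-- cited by loopA's decreasing_by
theorem findOpen_ge (cs : List Char) (j : Nat) : j ≤ findOpen cs j := by
  rw [findOpen]
  split
  · split
    · exact Nat.le_refl j
    · have := findOpen_ge cs (j + 1); omega
  · exact Nat.le_refl j
termination_by cs.length - j

-- cited by loopA's decreasing_by
theorem findOpen_gt (cs : List Char) (j : Nat) (h1 : j < cs.length) (h2 : ¬ cs[j] = '[') :
    j < findOpen cs j := by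
  rw [findOpen, dif_pos h1, if_neg h2]
  have := findOpen_ge cs (j + 1); omega

-- soln0 = []; for t in tokens: for x in soln: soln0.append(x + [t])
def stepA (soln : List (List (List Char))) (tokens : List (List Char)) :
    List (List (List Char)) :=
  tokens.foldl (fun acc t => soln.foldl (fun acc2 x => acc2 ++ [x ++ [t]]) acc) []

-- the main while loop of A (state: position i and soln); none = IndexError
def loopA (cs : List Char) (i : Nat) (soln : List (List (List Char))) :
    Option (List (List (List Char))) :=
  if h : i < cs.length then
    if hb : cs[i] = '[' then
      match hj : findClose cs i with
      | none => none
      | some j =>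
          loopA cs (j + 1)
            (stepA soln
              (PySem.Chars.splitOn (PySem.List.slice cs (some ((i : Int) + 1)) (some (j : Int))) ['|']))
    else
      loopA cs (findOpen cs i)
        (soln.map (fun x => x ++ [PySem.List.slice cs (some (i : Int)) (some ((findOpen cs i : Int)))]))
  else some soln
termination_by cs.length - i
decreasing_by
  · have := findClose_ge cs i j hj; omega
  · have := findOpen_gt cs i h hb; omega

def solve (s : String) : List String :=
  match loopA s.toList 0 [[]] with
  | none => []        -- the IndexError path (excluded by Pre_solve)
  | some soln => soln.map (fun t => String.ofList (PySem.Chars.join [] t))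

-- ===== PORT B =====
-- one step of B's for-loop; state = (segs, buf, inside)
def stepB (st : List (List (List Char)) × List Char × Bool) (ch : Char) :
    List (List (List Char)) × List Char × Bool :=
  match st with
  | (segs, buf, inside) =>
    if inside then
      if ch = ']' then (segs ++ [PySem.Chars.splitOn buf ['|']], [], false)
      else (segs, buf ++ [ch], true)
    else if ch = '[' then
      ((if buf.isEmpty then segs else segs ++ [[buf]]), [], true)
    else (segs, buf ++ [ch], false)

-- out = [c + suffix for suffix in out for c in choices]
def expandStep (out choices : List (List Char)) : List (List Char) :=
  out.flatMap (fun suffix => choices.map (fun c => c ++ suffix))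

def solve_alt (s : String) : List String :=
  match s.toList.foldl stepB ([], [], false) with
  | (segs, buf, inside) =>
    if inside then []   -- the ValueError path (excluded by Pre_solve)
    else
      (((if buf.isEmpty then segs else segs ++ [[buf]]).reverse.foldl expandStep [[]]).map
        String.ofList)

-- ===== PRECONDITION & SPEC =====
-- Pre_solve excludes strings with an unclosed '[' (a '[' after the last ']'), on which the
-- Python A raises IndexError (and B raises ValueError).
def Pre_solve (s : String) : Prop :=
  '[' ∉ s.toList.reverse.takeWhile (fun c => c ≠ ']')
instance (s : String) : Decidable (Pre_solve s) := by unfold Pre_solve; infer_instance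

def pvWitness_solve : String := "x[a|b]y"

def Spec_solve (s : String) (out : List String) : Prop := out = solve_alt s
instance (s : String) (out : List String) : Decidable (Spec_solve s out) := by
  unfold Spec_solve; infer_instance

-- ===== CLAIM (what is proved, stated in full; the proofs are below) =====
def Claim_equal_solve : Prop := ∀ (s : String), Dom_solve s → Pre_solve s → Spec_solve s (solve s)

-- ===== LEMMAS AND PROOFS =====

-- specification-level parser: the list of segment choice-lists from position i (none = no ']')
def parseR (cs : List Char) (i : Nat) : Option (List (List (List Char))) :=
  if h : i < cs.length then
    if hb : cs[i] = '[' then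
      match hj : findClose cs i with
      | none => none
      | some j =>
          (parseR cs (j + 1)).map
            (fun r =>
              PySem.Chars.splitOn (PySem.List.slice cs (some ((i : Int) + 1)) (some (j : Int))) ['|'] :: r)
    else
      (parseR cs (findOpen cs i)).map
        (fun r => [PySem.List.slice cs (some (i : Int)) (some ((findOpen cs i : Int)))] :: r)
  else some []
termination_by cs.length - i
decreasing_by
  · have := findClose_ge cs i j hj; omega
  · have := findOpen_gt cs i h hb; omega

def finishB (st : List (List (List Char)) × List Char × Bool) :
    Option (List (List (List Char))) :=
  match st with
  | (segs, buf, inside) =>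
    if inside then none else some (if buf.isEmpty then segs else segs ++ [[buf]])

theorem findClose_lt_length (cs : List Char) (j k : Nat) (h : findClose cs j = some k) :
    k < cs.length := by
  rw [findClose] at h
  split at h
  · rename_i hlt
    split at h
    · injection h with h'; omega
    · exact findClose_lt_length cs (j + 1) k h
  · cases h
termination_by cs.length - j

theorem findClose_close (cs : List Char) (j k : Nat) (h : findClose cs j = some k) :
    cs[k]? = some ']' := by
  rw [findClose] at h
  split at h
  · rename_i hlt
    split at h
    · rename_i hc
      injection h with h'
      subst h'
      simp [List.getElem?_eq_getElem hlt, hc]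
    · exact findClose_close cs (j + 1) k h
  · cases h
termination_by cs.length - j

theorem findClose_not_close (cs : List Char) (j k : Nat) (h : findClose cs j = some k)
    (m : Nat) (h1 : j ≤ m) (h2 : m < k) : cs[m]? ≠ some ']' := by
  rw [findClose] at h
  split at h
  · rename_i hlt
    split at h
    · injection h with h'; exfalso; omega
    · rename_i hc
      rcases Nat.eq_or_lt_of_le h1 with rfl | hlt2
      · simp [List.getElem?_eq_getElem hlt, hc]
      · exact findClose_not_close cs (j + 1) k h m hlt2 h2
  · cases h
termination_by cs.length - j

theorem findClose_none (cs : List Char) (j : Nat) (h : findClose cs j = none)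
    (m : Nat) (h1 : j ≤ m) (h2 : m < cs.length) : cs[m]? ≠ some ']' := by
  rw [findClose] at h
  split at h
  · rename_i hlt
    split at h
    · cases h
    · rename_i hc
      rcases Nat.eq_or_lt_of_le h1 with rfl | hlt2
      · simp [List.getElem?_eq_getElem hlt, hc]
      · exact findClose_none cs (j + 1) h m hlt2 h2
  · rename_i hlt; exfalso; omega
termination_by cs.length - j

theorem findOpen_le (cs : List Char) (j : Nat) (h : j ≤ cs.length) :
    findOpen cs j ≤ cs.length := by
  rw [findOpen]
  split
  · rename_i hlt
    split
    · omega
    · exact findOpen_le cs (j + 1) hlt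
  · exact h
termination_by cs.length - j

theorem findOpen_not_open (cs : List Char) (j m : Nat) (h1 : j ≤ m) (h2 : m < findOpen cs j) :
    cs[m]? ≠ some '[' := by
  rw [findOpen] at h2
  split at h2
  · rename_i hlt
    split at h2
    · exfalso; omega
    · rename_i hc
      rcases Nat.eq_or_lt_of_le h1 with rfl | hlt2
      · simp [List.getElem?_eq_getElem hlt, hc]
      · exact findOpen_not_open cs (j + 1) m hlt2 h2
  · exfalso; omega
termination_by cs.length - j

theorem findOpen_open (cs : List Char) (j : Nat) (h : findOpen cs j < cs.length) :
    cs[findOpen cs j]? = some '[' := by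
  by_cases hl : j < cs.length
  · by_cases hc : cs[j] = '['
    · rw [findOpen, dif_pos hl, if_pos hc] at h ⊢
      simp [List.getElem?_eq_getElem hl, hc]
    · rw [findOpen, dif_pos hl, if_neg hc] at h ⊢
      exact findOpen_open cs (j + 1) h
  · rw [findOpen, dif_neg hl] at h; exfalso; omega
termination_by cs.length - j

theorem mem_take_drop (cs : List Char) (i n : Nat) (c : Char)
    (hc : c ∈ (cs.drop i).take n) : ∃ m, i ≤ m ∧ m < i + n ∧ cs[m]? = some c := by
  obtain ⟨k, hk, he⟩ := List.mem_iff_getElem.mp hc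
  have hk' : k < n ∧ k < cs.length - i := by
    simp only [List.length_take, List.length_drop, Nat.lt_min] at hk
    omega
  refine ⟨i + k, Nat.le_add_right i k, by omega, ?_⟩
  rw [List.getElem?_eq_getElem (by omega)]
  simp only [List.getElem_take, List.getElem_drop] at he
  simp [he]

theorem mem_drop_spec (cs : List Char) (i : Nat) (c : Char) (hc : c ∈ cs.drop i) :
    ∃ m, i ≤ m ∧ m < cs.length ∧ cs[m]? = some c := by
  obtain ⟨k, hk, he⟩ := List.mem_iff_getElem.mp hc
  have hlen : k < cs.length - i := by simpa using hk
  refine ⟨i + k, Nat.le_add_right i k, by omega, ?_⟩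
  rw [List.getElem?_eq_getElem (by omega)]
  simp only [List.getElem_drop] at he
  simp [he]

theorem drop_surgery (cs : List Char) (i j : Nat) (hij : i ≤ j) :
    cs.drop i = (cs.drop i).take (j - i) ++ cs.drop j := by
  conv_lhs => rw [← List.take_append_drop (j - i) (cs.drop i)]
  congr 1
  rw [List.drop_drop]
  congr 1
  omega

-- the slice s[i+1:j] as drop/take
theorem slice_nat_succ (cs : List Char) (i j : Nat) :
    PySem.List.slice cs (some ((i : Int) + 1)) (some (j : Int)) =
      (cs.drop (i + 1)).take (j - (i + 1)) := by
  have h : ((i : Int) + 1) = (((i + 1 : Nat)) : Int) := by push_cast; ring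
  rw [h, PySem.List.slice_natCast]

theorem parseR_end (cs : List Char) (i : Nat) (h : ¬ i < cs.length) : parseR cs i = some [] := by
  rw [parseR, dif_neg h]

theorem parseR_brk_none (cs : List Char) (i : Nat) (h : i < cs.length) (hb : cs[i] = '[')
    (hj : findClose cs i = none) : parseR cs i = none := by
  rw [parseR, dif_pos h, dif_pos hb]
  split
  · rfl
  · rename_i j heq; rw [hj] at heq; cases heq

theorem parseR_brk (cs : List Char) (i j : Nat) (h : i < cs.length) (hb : cs[i] = '[')
    (hj : findClose cs i = some j) :
    parseR cs i =
      (parseR cs (j + 1)).map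
        (fun r => PySem.Chars.splitOn ((cs.drop (i + 1)).take (j - (i + 1))) ['|'] :: r) := by
  rw [parseR, dif_pos h, dif_pos hb]
  split
  · rename_i heq; rw [hj] at heq; cases heq
  · rename_i j' heq
    rw [hj] at heq
    injection heq with heq'
    subst heq'
    rw [slice_nat_succ]

theorem parseR_lit (cs : List Char) (i : Nat) (h : i < cs.length) (hb : ¬ cs[i] = '[') :
    parseR cs i =
      (parseR cs (findOpen cs i)).map
        (fun r => [(cs.drop i).take (findOpen cs i - i)] :: r) := by
  rw [parseR, dif_pos h, dif_neg hb, PySem.List.slice_natCast]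

theorem loopA_end (cs : List Char) (i : Nat) (soln : List (List (List Char)))
    (h : ¬ i < cs.length) : loopA cs i soln = some soln := by
  rw [loopA, dif_neg h]

theorem loopA_brk_none (cs : List Char) (i : Nat) (soln : List (List (List Char)))
    (h : i < cs.length) (hb : cs[i] = '[') (hj : findClose cs i = none) :
    loopA cs i soln = none := by
  rw [loopA, dif_pos h, dif_pos hb]
  split
  · rfl
  · rename_i j heq; rw [hj] at heq; cases heq

theorem loopA_brk (cs : List Char) (i j : Nat) (soln : List (List (List Char)))
    (h : i < cs.length) (hb : cs[i] = '[') (hj : findClose cs i = some j) :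
    loopA cs i soln =
      loopA cs (j + 1)
        (stepA soln (PySem.Chars.splitOn ((cs.drop (i + 1)).take (j - (i + 1))) ['|'])) := by
  rw [loopA, dif_pos h, dif_pos hb]
  split
  · rename_i heq; rw [hj] at heq; cases heq
  · rename_i j' heq
    rw [hj] at heq
    injection heq with heq'
    subst heq'
    rw [slice_nat_succ]

theorem loopA_lit (cs : List Char) (i : Nat) (soln : List (List (List Char)))
    (h : i < cs.length) (hb : ¬ cs[i] = '[') :
    loopA cs i soln =
      loopA cs (findOpen cs i)
        (soln.map (fun x => x ++ [(cs.drop i).take (findOpen cs i - i)])) := by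
  rw [loopA, dif_pos h, dif_neg hb, PySem.List.slice_natCast]

theorem stepA_eq (soln : List (List (List Char))) (tokens : List (List Char)) :
    stepA soln tokens = tokens.flatMap (fun t => soln.map (· ++ [t])) := by
  unfold stepA
  simp only [PySem.List.foldl_append_singleton_eq_map, PySem.List.foldl_append_eq_flatMap]
  simp

theorem loopA_eq_parseR (cs : List Char) (i : Nat) (soln : List (List (List Char))) :
    loopA cs i soln = (parseR cs i).map (fun r => r.foldl stepA soln) := by
  by_cases h : i < cs.length
  · by_cases hb : cs[i] = '['
    · cases hjc : findClose cs i with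
      | none => rw [loopA_brk_none cs i soln h hb hjc, parseR_brk_none cs i h hb hjc]; rfl
      | some j =>
        have hij := findClose_ge cs i j hjc
        rw [loopA_brk cs i j soln h hb hjc, parseR_brk cs i j h hb hjc,
          loopA_eq_parseR cs (j + 1) _]
        cases parseR cs (j + 1) <;> simp
    · have hij := findOpen_gt cs i h hb
      rw [loopA_lit cs i soln h hb, parseR_lit cs i h hb,
        loopA_eq_parseR cs (findOpen cs i) _]
      cases parseR cs (findOpen cs i) <;> simp [stepA_eq]
  · rw [loopA_end cs i soln h, parseR_end cs i h]; rfl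
termination_by cs.length - i
decreasing_by all_goals omega

theorem foldl_stepB_lit (run : List Char) (segs : List (List (List Char))) (buf : List Char)
    (h : ∀ c ∈ run, c ≠ '[') :
    run.foldl stepB (segs, buf, false) = (segs, buf ++ run, false) := by
  cases run with
  | nil => simp
  | cons c l =>
    have hc := h c (by simp)
    simp only [List.foldl_cons]
    rw [show stepB (segs, buf, false) c = (segs, buf ++ [c], false) from by simp [stepB, hc]]
    rw [foldl_stepB_lit l segs (buf ++ [c]) (fun d hd => h d (by simp [hd]))]
    simp

theorem foldl_stepB_ins (l : List Char) (segs : List (List (List Char))) (buf : List Char)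
    (h : ∀ c ∈ l, c ≠ ']') :
    l.foldl stepB (segs, buf, true) = (segs, buf ++ l, true) := by
  cases l with
  | nil => simp
  | cons c l' =>
    have hc := h c (by simp)
    simp only [List.foldl_cons]
    rw [show stepB (segs, buf, true) c = (segs, buf ++ [c], true) from by simp [stepB, hc]]
    rw [foldl_stepB_ins l' segs (buf ++ [c]) (fun d hd => h d (by simp [hd]))]
    simp

theorem foldl_stepB_spec (cs : List Char) (i : Nat) (segs : List (List (List Char)))
    (hi : i ≤ cs.length) :
    finishB ((cs.drop i).foldl stepB (segs, [], false)) =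
      (parseR cs i).map (fun r => segs ++ r) := by
  by_cases h : i < cs.length
  · by_cases hb : cs[i] = '['
    · cases hjc : findClose cs i with
      | none =>
        have hno : ∀ c ∈ cs.drop (i + 1), c ≠ ']' := by
          intro c hcm
          obtain ⟨m, hm1, hm2, hm3⟩ := mem_drop_spec cs (i + 1) c hcm
          intro hEq; subst hEq
          exact findClose_none cs i hjc m (by omega) hm2 hm3
        rw [parseR_brk_none cs i h hb hjc, List.drop_eq_getElem_cons h, List.foldl_cons,
          show stepB (segs, [], false) (cs[i]'h) = (segs, [], true) from by simp [stepB, hb],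
          foldl_stepB_ins _ _ _ hno]
        simp [finishB]
      | some j =>
        have hij := findClose_ge cs i j hjc
        have hjl := findClose_lt_length cs i j hjc
        have hcj := findClose_close cs i j hjc
        have hcj' : cs[j]'hjl = ']' := by
          rw [List.getElem?_eq_getElem hjl] at hcj
          exact Option.some.inj hcj
        have hij1 : i + 1 ≤ j := by
          rcases Nat.eq_or_lt_of_le hij with rfl | h2
          · rw [hb] at hcj'; exact absurd hcj' (by decide)
          · omega
        have hcontent : ∀ c ∈ (cs.drop (i + 1)).take (j - (i + 1)), c ≠ ']' := by
          intro c hcm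
          obtain ⟨m, hm1, hm2, hm3⟩ := mem_take_drop cs (i + 1) _ c hcm
          intro hEq; subst hEq
          exact findClose_not_close cs i j hjc m (by omega) (by omega) hm3
        have hsur : cs.drop (i + 1) = (cs.drop (i + 1)).take (j - (i + 1)) ++ cs.drop j :=
          drop_surgery cs (i + 1) j hij1
        have hdj : cs.drop j = ']' :: cs.drop (j + 1) := by
          rw [List.drop_eq_getElem_cons hjl, hcj']
        calc finishB ((cs.drop i).foldl stepB (segs, [], false))
            = finishB ((cs.drop (j + 1)).foldl stepB
                (segs ++ [PySem.Chars.splitOn ((cs.drop (i + 1)).take (j - (i + 1))) ['|']],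
                  [], false)) := by
              rw [List.drop_eq_getElem_cons h, List.foldl_cons,
                show stepB (segs, [], false) (cs[i]'h) = (segs, [], true) from by
                  simp [stepB, hb]]
              conv_lhs => rw [hsur]
              rw [List.foldl_append, foldl_stepB_ins _ _ _ hcontent, hdj, List.foldl_cons]
              simp [stepB]
          _ = (parseR cs (j + 1)).map
                (fun r =>
                  (segs ++ [PySem.Chars.splitOn ((cs.drop (i + 1)).take (j - (i + 1))) ['|']]) ++ r) :=
              foldl_stepB_spec cs (j + 1)
                (segs ++ [PySem.Chars.splitOn ((cs.drop (i + 1)).take (j - (i + 1))) ['|']])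
                (by omega)
          _ = (parseR cs i).map (fun r => segs ++ r) := by
              rw [parseR_brk cs i j h hb hjc]
              cases parseR cs (j + 1) <;> simp
    · have hij := findOpen_gt cs i h hb
      have hjl := findOpen_le cs i hi
      have hrun_no : ∀ c ∈ (cs.drop i).take (findOpen cs i - i), c ≠ '[' := by
        intro c hcm
        obtain ⟨m, hm1, hm2, hm3⟩ := mem_take_drop cs i _ c hcm
        intro hEq; subst hEq
        exact findOpen_not_open cs i m hm1 (by omega) hm3
      have hrunne : ((cs.drop i).take (findOpen cs i - i)).isEmpty = false := by
        have hlen : ((cs.drop i).take (findOpen cs i - i)).length ≠ 0 := by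
          simp only [List.length_take, List.length_drop]
          omega
        simp_all
      have hsur := drop_surgery cs i (findOpen cs i) (by omega)
      rw [hsur, List.foldl_append, foldl_stepB_lit _ _ _ hrun_no]
      by_cases hjlen : findOpen cs i < cs.length
      · have hcj := findOpen_open cs i hjlen
        have hcj' : cs[findOpen cs i]'hjlen = '[' := by
          rw [List.getElem?_eq_getElem hjlen] at hcj
          exact Option.some.inj hcj
        have hdj : cs.drop (findOpen cs i) = '[' :: cs.drop (findOpen cs i + 1) := by
          rw [List.drop_eq_getElem_cons hjlen, hcj']
        rw [hdj, List.foldl_cons,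
          show stepB (segs, [] ++ (cs.drop i).take (findOpen cs i - i), false) '[' =
              (segs ++ [[(cs.drop i).take (findOpen cs i - i)]], [], true) from by
            simp [stepB, hrunne],
          show (cs.drop (findOpen cs i + 1)).foldl stepB
                (segs ++ [[(cs.drop i).take (findOpen cs i - i)]], [], true) =
              (cs.drop (findOpen cs i)).foldl stepB
                (segs ++ [[(cs.drop i).take (findOpen cs i - i)]], [], false) from by
            rw [hdj, List.foldl_cons]; simp [stepB],
          foldl_stepB_spec cs (findOpen cs i) (segs ++ [[(cs.drop i).take (findOpen cs i - i)]])
            (by omega),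
          parseR_lit cs i h hb]
        cases parseR cs (findOpen cs i) <;> simp
      · have hfo : findOpen cs i = cs.length := by omega
        rw [hfo] at hrunne ⊢
        rw [List.drop_length, List.foldl_nil, parseR_lit cs i h hb, hfo,
          parseR_end cs cs.length (by omega)]
        simp [finishB, hrunne]
  · rw [parseR_end cs i h, List.drop_eq_nil_of_le (by omega), List.foldl_nil]
    simp [finishB]
termination_by cs.length - i
decreasing_by all_goals omega

theorem join_empty_eq_flatten (l : List (List Char)) : PySem.Chars.join [] l = l.flatten := by
  cases l with
  | nil => simp [PySem.Chars.join_nil]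
  | cons p rest =>
    cases rest with
    | nil => simp [PySem.Chars.join_singleton]
    | cons q rest' =>
      rw [PySem.Chars.join_cons_cons, join_empty_eq_flatten (q :: rest')]
      simp

theorem foldA_flatten (segs soln : List (List (List Char))) :
    (segs.foldl stepA soln).map List.flatten =
      (segs.foldr (fun C out => expandStep out C) [[]]).flatMap
        (fun suf => soln.map (fun x => x.flatten ++ suf)) := by
  induction segs generalizing soln with
  | nil => simp
  | cons C rest ih =>
    simp only [List.foldl_cons, List.foldr_cons]
    rw [ih (stepA soln C)]
    simp only [expandStep, stepA_eq]
    rw [List.flatMap_assoc]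
    apply List.flatMap_congr
    intro suf _
    simp [List.map_flatMap, List.flatMap_map, List.map_map, Function.comp_def]

theorem solve_eq_alt (s : String) : solve s = solve_alt s := by
  have hM := foldl_stepB_spec s.toList 0 [] (Nat.zero_le _)
  rw [List.drop_zero] at hM
  have hA := loopA_eq_parseR s.toList 0 [[]]
  unfold solve solve_alt
  cases hp : parseR s.toList 0 with
  | none =>
    rw [hp] at hM hA
    simp only [Option.map_none] at hM hA
    rw [hA]
    rcases hfold : s.toList.foldl stepB ([], [], false) with ⟨segs, buf, inside⟩
    rw [hfold] at hM
    cases inside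
    · simp [finishB] at hM
    · simp
  | some r =>
    rw [hp] at hM hA
    simp only [Option.map_some] at hM hA
    rw [hA]
    rcases hfold : s.toList.foldl stepB ([], [], false) with ⟨segs, buf, inside⟩
    rw [hfold] at hM
    cases inside
    · simp only [finishB, Bool.false_eq_true, if_false, Option.some.injEq,
        List.nil_append] at hM
      simp only [hM, List.foldl_reverse]
      have hkey := foldA_flatten r [[]]
      simp only [List.map_cons, List.map_nil, List.flatten_nil, List.nil_append,
        List.flatMap_singleton'] at hkey
      rw [show (fun t => String.ofList (PySem.Chars.join [] t)) =
          (fun t : List (List Char) => String.ofList t.flatten) from by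
        funext t; rw [join_empty_eq_flatten]]
      rw [show (fun t : List (List Char) => String.ofList t.flatten) =
          String.ofList ∘ List.flatten from rfl, ← List.map_map, hkey]
      simp
    · simp [finishB] at hM

-- ===== VERDICT (by name: the statement is the Claim_ definition above) =====
theorem solve_spec : Claim_equal_solve := by
  intro s _ _
  exact solve_eq_alt s
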